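-- pv_equiv track=rewrite | github.com/wuyaqiang/Algorithm_Learn | 笔试题 记录/秋招/demo_1.py | pool_problem
-- ===== SOURCE A (Python) =====
-- def pool_problem(m, t, m1, t1, m2, t2):
--     '''
--     :param m:  泳池最大容量 m
--     :param t:  经过 t 分钟后，泳池里有多少升水？
--     :param m1: 给水管每分钟注入 m1 升水
--     :param t1: 每经过 t1 分钟，给水管状态改变
--     :param m2: 排水管每分钟排除 m2 升水
--     :param t2: 每经过 t2 分钟，排水管状态改变
--     :return: 经过 t 分钟后，泳池里有多少升水？
--     '''
--     water_in, water_out = True, True    # 初始化给水管和排水管都为打开状态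
--     pool_vol = 0    # 水池中水量
--     for i in range(t):
--         if i > 0 and i % t1 == 0:
--             water_in = not water_in
--         if i > 0 and i % t2 == 0:
--             water_out = not water_out
--         if water_in and water_out:
--             pool_vol += m1 - m2
--         elif water_in:
--             pool_vol += m1
--         elif water_out:
--             pool_vol -= m2
--         if pool_vol > m:
--             pool_vol = m
--         if pool_vol < 0:
--             pool_vol = 0
--     return pool_vol
-- ===== SOURCE B (Python) =====
-- def pool_problem(m, t, m1, t1, m2, t2):
--     # Segment-merged simulation: jump between pipe state-change points,
--     # clamping the constant-rate segment in O(1) instead of per minute.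
--     p1, p2 = abs(t1), abs(t2)
--     win, wout = True, True
--     vol, cur = 0, 0
--     while cur < t:
--         nxt = min(cur - cur % p1 + p1, cur - cur % p2 + p2, t)
--         rate = (m1 if win else 0) - (m2 if wout else 0)
--         vol = max(min(vol + (nxt - cur) * rate, m), 0)
--         if nxt % p1 == 0:
--             win = not win
--         if nxt % p2 == 0:
--             wout = not wout
--         cur = nxt
--     return vol
-- ===== Notes on version B (the rewrite author's own statement) =====
-- stated objective: faster
-- what changed: Instead of simulating every minute, B jumps between consecutive pipe state-change points (multiples of |t1| and |t2|), applying each constant-rate segment with a single monotone clamp max(min(.,m),0).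
-- outside the precondition, e.g. on pool_problem(5, 1, 3, 0, 2, 2): A returns 1, B raises ZeroDivisionError
import Mathlib
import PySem

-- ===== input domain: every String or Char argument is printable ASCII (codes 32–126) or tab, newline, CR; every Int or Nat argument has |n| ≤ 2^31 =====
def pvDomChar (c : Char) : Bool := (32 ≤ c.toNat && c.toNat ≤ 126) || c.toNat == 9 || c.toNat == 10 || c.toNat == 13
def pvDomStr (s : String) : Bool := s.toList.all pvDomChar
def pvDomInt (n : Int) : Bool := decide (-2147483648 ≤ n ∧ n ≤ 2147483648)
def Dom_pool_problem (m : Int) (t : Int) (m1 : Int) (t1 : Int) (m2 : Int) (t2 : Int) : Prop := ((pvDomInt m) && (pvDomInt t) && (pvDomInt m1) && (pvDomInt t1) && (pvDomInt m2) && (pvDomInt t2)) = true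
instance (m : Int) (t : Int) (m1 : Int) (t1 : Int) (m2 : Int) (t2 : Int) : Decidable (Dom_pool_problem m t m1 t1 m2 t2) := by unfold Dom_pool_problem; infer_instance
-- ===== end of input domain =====

-- B replaces A's per-minute simulation by one clamped jump per constant-rate segment
-- between pipe state-change points (faster when |t1|,|t2| > 1); return value only.

-- ===== PORT A =====
-- one iteration of A's for-loop, state = (water_in, water_out, pool_vol)
def poolStepA (m : Int) (m1 : Int) (t1 : Int) (m2 : Int) (t2 : Int)
    (s : Bool × Bool × Int) (i : Int) : Bool × Bool × Int :=
  let win := if i > 0 && (PySem.Int.mod i t1 == 0) then !s.1 else s.1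
  let wout := if i > 0 && (PySem.Int.mod i t2 == 0) then !s.2.1 else s.2.1
  let v := if win && wout then s.2.2 + (m1 - m2)
           else if win then s.2.2 + m1
           else if wout then s.2.2 - m2
           else s.2.2
  let v := if v > m then m else v
  let v := if v < 0 then 0 else v
  (win, wout, v)

def pool_problem (m : Int) (t : Int) (m1 : Int) (t1 : Int) (m2 : Int) (t2 : Int) : Int :=
  ((PySem.List.pyRange 0 t 1).foldl (poolStepA m m1 t1 m2 t2) (true, true, 0)).2.2

-- ===== PORT B =====
-- B's while-loop; the `1 ≤ p1 ∧ 1 ≤ p2` conjuncts only make the recursion total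
-- (in Python `cur % 0` raises ZeroDivisionError there; excluded by Pre_)
def poolSegLoop (m : Int) (t : Int) (m1 : Int) (m2 : Int) (p1 : Int) (p2 : Int)
    (win : Bool) (wout : Bool) (vol : Int) (cur : Int) : Int :=
  if h : cur < t ∧ 1 ≤ p1 ∧ 1 ≤ p2 then
    let nxt := min (min (cur - PySem.Int.mod cur p1 + p1) (cur - PySem.Int.mod cur p2 + p2)) t
    let rate := (if win then m1 else 0) - (if wout then m2 else 0)
    let vol' := max (min (vol + (nxt - cur) * rate) m) 0
    let win' := if PySem.Int.mod nxt p1 == 0 then !win else win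
    let wout' := if PySem.Int.mod nxt p2 == 0 then !wout else wout
    poolSegLoop m t m1 m2 p1 p2 win' wout' vol' nxt
  else vol
termination_by (t - cur).toNat
decreasing_by
  have a1 := PySem.Int.mod_nonneg cur (show (0:Int) < p1 by omega)
  have a2 := PySem.Int.mod_lt cur (show (0:Int) < p1 by omega)
  have b1 := PySem.Int.mod_nonneg cur (show (0:Int) < p2 by omega)
  have b2 := PySem.Int.mod_lt cur (show (0:Int) < p2 by omega)
  omega

def pool_problem_alt (m : Int) (t : Int) (m1 : Int) (t1 : Int) (m2 : Int) (t2 : Int) : Int :=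
  poolSegLoop m t m1 m2 |t1| |t2| true true 0 0

-- ===== PRECONDITION & SPEC =====
-- Pre_ excludes t > 0 with t1 = 0 or t2 = 0: there A raises ZeroDivisionError for t ≥ 2
-- (and for t = 1 only short-circuiting `i > 0 and ...` hides the zero divisor), and B's
-- own algorithm divides by the period and raises ZeroDivisionError.
def Pre_pool_problem (m : Int) (t : Int) (m1 : Int) (t1 : Int) (m2 : Int) (t2 : Int) : Prop :=
  0 < t → (t1 ≠ 0 ∧ t2 ≠ 0)
instance (m : Int) (t : Int) (m1 : Int) (t1 : Int) (m2 : Int) (t2 : Int) : Decidable (Pre_pool_problem m t m1 t1 m2 t2) := by unfold Pre_pool_problem; infer_instance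

def pvWitness_pool_problem : Int × Int × Int × Int × Int × Int := (10, 5, 2, 3, 1, 2)

def Spec_pool_problem (m : Int) (t : Int) (m1 : Int) (t1 : Int) (m2 : Int) (t2 : Int) (out : Int) : Prop := out = pool_problem_alt m t m1 t1 m2 t2
instance (m : Int) (t : Int) (m1 : Int) (t1 : Int) (m2 : Int) (t2 : Int) (out : Int) : Decidable (Spec_pool_problem m t m1 t1 m2 t2 out) := by unfold Spec_pool_problem; infer_instance

-- ===== CLAIM (what is proved, stated in full; the proofs are below) =====
def Claim_equal_pool_problem : Prop := ∀ (m : Int) (t : Int) (m1 : Int) (t1 : Int) (m2 : Int) (t2 : Int), Dom_pool_problem m t m1 t1 m2 t2 → Pre_pool_problem m t m1 t1 m2 t2 → Spec_pool_problem m t m1 t1 m2 t2 (pool_problem m t m1 t1 m2 t2)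

-- ===== LEMMAS AND PROOFS =====

-- Python's sequential clamp (if v > m: v = m; if v < 0: v = 0) as one function
def clampP (m v : Int) : Int := max (min v m) 0

-- volume invariant maintained by the loop
def InvP (m v : Int) : Prop := 0 ≤ v ∧ (v ≤ m ∨ v = 0)

-- minute-by-minute reference run, bools in "post-toggle at cur" convention
def runP (m : Int) (t : Int) (m1 : Int) (m2 : Int) (p1 : Int) (p2 : Int)
    (win : Bool) (wout : Bool) (vol : Int) (cur : Int) : Int :=
  if h : cur < t then
    runP m t m1 m2 p1 p2
      (if PySem.Int.mod (cur + 1) p1 == 0 then !win else win)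
      (if PySem.Int.mod (cur + 1) p2 == 0 then !wout else wout)
      (clampP m (vol + ((if win then m1 else 0) - (if wout then m2 else 0))))
      (cur + 1)
  else vol
termination_by (t - cur).toNat
decreasing_by omega

theorem mod_beq_dvd (i p : Int) : (PySem.Int.mod i p == 0) = decide (p ∣ i) := by
  rw [Bool.eq_iff_iff]
  simp [PySem.Int.mod_eq_zero_iff_dvd]

theorem mod_abs_zero (i b : Int) : (PySem.Int.mod i |b| == 0) = (PySem.Int.mod i b == 0) := by
  rw [mod_beq_dvd, mod_beq_dvd, Bool.eq_iff_iff]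
  simp [abs_dvd]

theorem rate_eq (v a b : Int) (x y : Bool) :
    (if x && y then v + (a - b) else if x then v + a else if y then v - b else v)
      = v + ((if x then a else 0) - (if y then b else 0)) := by
  cases x <;> cases y <;> simp <;> ring

theorem clamp_eq (m u : Int) :
    (if (if u > m then m else u) < 0 then 0 else (if u > m then m else u)) = clampP m u := by
  simp only [clampP, Int.max_def, Int.min_def]
  split_ifs <;> omega

theorem stepA_eq (m m1 t1 m2 t2 : Int) (w1 w2 : Bool) (v i : Int) :
    poolStepA m m1 t1 m2 t2 (w1, w2, v) i =
      (if i > 0 && (PySem.Int.mod i t1 == 0) then !w1 else w1,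
       if i > 0 && (PySem.Int.mod i t2 == 0) then !w2 else w2,
       clampP m (v + ((if (if i > 0 && (PySem.Int.mod i t1 == 0) then !w1 else w1) then m1 else 0)
                    - (if (if i > 0 && (PySem.Int.mod i t2 == 0) then !w2 else w2) then m2 else 0)))) := by
  simp only [poolStepA]
  rw [rate_eq, clamp_eq]

theorem inv_clamp (m v : Int) : InvP m (clampP m v) := by
  simp only [InvP, clampP, Int.max_def, Int.min_def]
  split_ifs <;> omega

theorem clamp_clamp (m v a b : Int) (hv : InvP m v)
    (hab : (0 ≤ a ∧ 0 ≤ b) ∨ (a ≤ 0 ∧ b ≤ 0)) :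
    clampP m (clampP m (v + a) + b) = clampP m (v + a + b) := by
  obtain ⟨h1, h2⟩ := hv
  simp only [clampP, Int.max_def, Int.min_def]
  split_ifs <;> omega

-- least multiple of p strictly above cur is cur - cur % p + p
theorem next_mult (p i cur : Int) (hp : 0 < p) (hd : p ∣ i) (hi : cur < i) :
    cur - PySem.Int.mod cur p + p ≤ i := by
  have hmul := PySem.Int.floordiv_mul_add_mod cur p
  have hnn := PySem.Int.mod_nonneg cur hp
  have hdd : p ∣ (i - (cur - PySem.Int.mod cur p)) := by
    have he : cur - PySem.Int.mod cur p = PySem.Int.floordiv cur p * p := by omega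
    exact dvd_sub hd (he ▸ dvd_mul_left p (PySem.Int.floordiv cur p))
  have hpos : 0 < i - (cur - PySem.Int.mod cur p) := by omega
  have := Int.le_of_dvd hpos hdd
  omega

-- A's fold from minute cur equals the post-toggle reference run
theorem foldA_eq_runP (m t m1 t1 m2 t2 : Int) (ht1 : t1 ≠ 0) (ht2 : t2 ≠ 0) :
    ∀ (n : Nat) (cur : Int) (w1 w2 : Bool) (v : Int), 0 ≤ cur → (t - cur).toNat = n →
    ((PySem.List.pyRange cur t 1).foldl (poolStepA m m1 t1 m2 t2) (w1, w2, v)).2.2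
      = runP m t m1 m2 |t1| |t2|
          (if cur > 0 && (PySem.Int.mod cur t1 == 0) then !w1 else w1)
          (if cur > 0 && (PySem.Int.mod cur t2 == 0) then !w2 else w2) v cur := by
  intro n
  induction n with
  | zero =>
    intro cur w1 w2 v hcur hn
    have hge : t ≤ cur := by omega
    rw [PySem.List.pyRange_one_eq_nil hge, runP]
    simp [hge, not_lt.mpr hge]
  | succ k ih =>
    intro cur w1 w2 v hcur hn
    have hlt : cur < t := by omega
    rw [PySem.List.pyRange_one_cons hlt, List.foldl_cons, stepA_eq, runP]
    rw [ih (cur + 1) _ _ _ (by omega) (by omega)]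
    have e1 : ((cur + 1 > 0) && (PySem.Int.mod (cur+1) t1 == 0)) = (PySem.Int.mod (cur+1) |t1| == 0) := by
      rw [mod_abs_zero]; simp [show cur + 1 > 0 by omega]
    have e2 : ((cur + 1 > 0) && (PySem.Int.mod (cur+1) t2 == 0)) = (PySem.Int.mod (cur+1) |t2| == 0) := by
      rw [mod_abs_zero]; simp [show cur + 1 > 0 by omega]
    rw [e1, e2]
    simp [hlt]

-- advancing the reference run across one toggle-free constant-rate segment
theorem runP_seg (m t m1 m2 p1 p2 : Int) :
    ∀ (k : Nat) (cur : Int) (win wout : Bool) (vol : Int),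
    0 ≤ cur → 1 ≤ k → cur + k ≤ t →
    (∀ i : Int, cur < i → i < cur + k → ¬ (p1 ∣ i) ∧ ¬ (p2 ∣ i)) →
    InvP m vol →
    runP m t m1 m2 p1 p2 win wout vol cur
      = runP m t m1 m2 p1 p2
          (if p1 ∣ (cur + k) then !win else win)
          (if p2 ∣ (cur + k) then !wout else wout)
          (clampP m (vol + k * ((if win then m1 else 0) - (if wout then m2 else 0))))
          (cur + k) := by
  intro k
  induction k with
  | zero => intro cur win wout vol _ hk; omega
  | succ k ih =>
    intro cur win wout vol hcur hk hle hfree hinv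
    by_cases hk1 : k = 0
    · subst hk1
      have hlt : cur < t := by omega
      rw [runP]
      simp only [hlt, dite_true]
      rw [mod_beq_dvd, mod_beq_dvd]
      norm_num
    · have hk1' : 1 ≤ k := by omega
      have hlt : cur < t := by omega
      have hfree1 := hfree (cur + 1) (by omega) (by push_cast; omega)
      rw [runP]
      simp only [hlt, dite_true]
      rw [mod_beq_dvd, mod_beq_dvd, decide_eq_false hfree1.1, decide_eq_false hfree1.2]
      simp only [Bool.false_eq_true, if_false]
      rw [ih (cur + 1) win wout _ (by omega) hk1' (by push_cast at hle ⊢; omega)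
          (by intro i h1 h2; exact hfree i (by omega) (by push_cast at h2 ⊢; omega))
          (inv_clamp m _)]
      have hre : clampP m (clampP m (vol + ((if win then m1 else 0) - (if wout then m2 else 0)))
            + k * ((if win then m1 else 0) - (if wout then m2 else 0)))
          = clampP m (vol + (k + 1 : Nat) * ((if win then m1 else 0) - (if wout then m2 else 0))) := by
        set r := ((if win then m1 else 0) - (if wout then m2 else 0)) with hr
        have hsgn : (0 ≤ r ∧ 0 ≤ (k:Int) * r) ∨ (r ≤ 0 ∧ (k:Int) * r ≤ 0) := by
          rcases le_total 0 r with h | h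
          · exact Or.inl ⟨h, mul_nonneg (by positivity) h⟩
          · exact Or.inr ⟨h, mul_nonpos_of_nonneg_of_nonpos (by positivity) h⟩
        have := clamp_clamp m vol r ((k:Int) * r) hinv hsgn
        rw [this]; congr 1; push_cast; ring
      rw [hre]
      have : cur + 1 + (k : Int) = cur + ((k:Nat) + 1 : Nat) := by push_cast; omega
      rw [this]

-- the reference run equals B's segment loop
theorem runP_eq_segLoop (m t m1 m2 p1 p2 : Int) (hp1 : 1 ≤ p1) (hp2 : 1 ≤ p2) :
    ∀ (n : Nat) (cur : Int) (win wout : Bool) (vol : Int),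
    0 ≤ cur → (t - cur).toNat = n → InvP m vol →
    runP m t m1 m2 p1 p2 win wout vol cur = poolSegLoop m t m1 m2 p1 p2 win wout vol cur := by
  intro n
  induction n using Nat.strong_induction_on with
  | _ n ih =>
    intro cur win wout vol hcur hn hinv
    by_cases hlt : cur < t
    · have a1 := PySem.Int.mod_nonneg cur (show (0:Int) < p1 by omega)
      have a2 := PySem.Int.mod_lt cur (show (0:Int) < p1 by omega)
      have b1 := PySem.Int.mod_nonneg cur (show (0:Int) < p2 by omega)
      have b2 := PySem.Int.mod_lt cur (show (0:Int) < p2 by omega)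
      rw [poolSegLoop]
      simp only [hlt, hp1, hp2, and_self, and_true, dite_true]
      set nxt := min (min (cur - PySem.Int.mod cur p1 + p1) (cur - PySem.Int.mod cur p2 + p2)) t with hnxt
      have hcn : cur < nxt := by omega
      have hnt : nxt ≤ t := by omega
      have hfree : ∀ i : Int, cur < i → i < nxt → ¬ (p1 ∣ i) ∧ ¬ (p2 ∣ i) := by
        intro i h1 h2
        constructor
        · intro hd
          have := next_mult p1 i cur (by omega) hd h1
          omega
        · intro hd
          have := next_mult p2 i cur (by omega) hd h1
          omega
      have hkint : cur + ((nxt - cur).toNat : Int) = nxt := by omega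
      have hseg := runP_seg m t m1 m2 p1 p2 (nxt - cur).toNat cur win wout vol hcur
        (by omega) (by omega) (by intro i ha hb; exact hfree i ha (by omega)) hinv
      rw [hkint] at hseg
      rw [hseg]
      rw [mod_beq_dvd, mod_beq_dvd]
      simp only [decide_eq_true_eq, Bool.if_true_left]
      rw [show (if p1 ∣ nxt then !win else win) = (if decide (p1 ∣ nxt) = true then !win else win) by simp,
          show (if p2 ∣ nxt then !wout else wout) = (if decide (p2 ∣ nxt) = true then !wout else wout) by simp]
      have hvol : clampP m (vol + ((nxt - cur).toNat : Int) * ((if win then m1 else 0) - (if wout then m2 else 0)))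
          = max (min (vol + (nxt - cur) * ((if win then m1 else 0) - (if wout then m2 else 0))) m) 0 := by
        simp only [clampP]
        rw [Int.toNat_of_nonneg (show (0:Int) ≤ nxt - cur by omega)]
      rw [hvol]
      exact ih (t - nxt).toNat (by omega) nxt _ _ _ (by omega) rfl (by rw [← hvol]; exact inv_clamp m _)
    · rw [runP, poolSegLoop]
      simp [hlt]

-- ===== VERDICT (by name: the statement is the Claim_ definition above) =====
theorem pool_problem_spec : Claim_equal_pool_problem := by
  intro m t m1 t1 m2 t2 _ hpre
  unfold Spec_pool_problem pool_problem pool_problem_alt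
  by_cases ht : 0 < t
  · obtain ⟨ht1, ht2⟩ := hpre ht
    have h1 := foldA_eq_runP m t m1 t1 m2 t2 ht1 ht2 (t - 0).toNat 0 true true 0 (le_refl 0) rfl
    simp only [show ¬ ((0:Int) > 0) by omega, decide_false, Bool.false_and, if_false] at h1
    rw [h1]
    exact runP_eq_segLoop m t m1 m2 |t1| |t2|
      (by have := abs_pos.mpr ht1; omega) (by have := abs_pos.mpr ht2; omega) (t - 0).toNat 0 true true 0
      (le_refl 0) rfl ⟨le_refl 0, Or.inr rfl⟩
  · rw [PySem.List.pyRange_one_eq_nil (by omega), poolSegLoop]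
    simp [show ¬ ((0:Int) < t) by omega]
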